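-- pv_equiv track=rewrite | github.com/Audrey1618/Coz | Microsoft/2021/pilesEqualHeight.py | solution
-- ===== SOURCE A (Python) =====
-- def solution(v):
--     n = len(v) # n = 3
--     if n < 2:
--         return 0
--     v.sort()
--     # 1 2 5
--     #   t s
--     # s   t
--     res = 0
--     for i in range(1, n):
--         if v[n - i - 1] != v[n - i]:
--             res += i
--     return res
-- ===== SOURCE B (Python) =====
-- def solution(v):
--     counts = {}
--     for x in v:
--         counts[x] = counts.get(x, 0) + 1
--     res = 0
--     for rank, val in enumerate(sorted(counts)):
--         res += rank * counts[val]
--     return res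
-- ===== Notes on version B (the rewrite author's own statement) =====
-- stated objective: alternative
-- what changed: B replaces A's sort-then-adjacent-comparison scan with a value-frequency dictionary: it counts occurrences of each value in one pass, sorts only the distinct values, and sums rank*count over them; B also does not mutate v (A sorts it in place).
import Mathlib
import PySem

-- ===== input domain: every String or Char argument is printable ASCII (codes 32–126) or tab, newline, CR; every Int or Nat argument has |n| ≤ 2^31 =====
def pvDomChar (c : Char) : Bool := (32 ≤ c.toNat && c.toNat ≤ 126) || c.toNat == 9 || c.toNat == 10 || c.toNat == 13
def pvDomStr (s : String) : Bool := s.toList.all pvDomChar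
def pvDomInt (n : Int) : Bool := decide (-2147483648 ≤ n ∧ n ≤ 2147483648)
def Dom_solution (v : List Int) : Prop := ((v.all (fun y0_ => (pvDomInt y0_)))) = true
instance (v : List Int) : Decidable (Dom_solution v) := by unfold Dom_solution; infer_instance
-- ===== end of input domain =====

-- B counts each value's frequency in a dict and sums rank*count over the sorted distinct
-- values; return values agree with A everywhere. Side effects differ: A sorts v in place,
-- B does not mutate v — the equivalence proved here is about the return value only.

-- ===== PORT A =====
def solution (v : List Int) : Int :=
  let n : Int := v.length
  if n < 2 then 0
  else
    let s := PySem.List.sorted v (fun x => x) false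
    (PySem.List.pyRange 1 n 1).foldl
      (fun res i =>
        if PySem.List.pyGetD s (n - i - 1) 0 ≠ PySem.List.pyGetD s (n - i) 0 then res + i else res)
      0

-- ===== PORT B =====
def solution_alt (v : List Int) : Int :=
  let counts := v.foldl (fun d x => PySem.Dict.insert d x (PySem.Dict.getD d x 0 + 1)) PySem.Dict.empty
  (PySem.List.enumerate (PySem.List.sorted (PySem.Dict.keys counts) (fun x => x) false)).foldl
    (fun res p => res + p.1 * PySem.Dict.getD counts p.2 0) 0

-- ===== PRECONDITION & SPEC =====
def Spec_solution (v : List Int) (out : Int) : Prop := out = solution_alt v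
instance (v : List Int) (out : Int) : Decidable (Spec_solution v out) := by unfold Spec_solution; infer_instance

-- ===== CLAIM (what is proved, stated in full; the proofs are below) =====
def Claim_equal_solution : Prop := ∀ (v : List Int), Dom_solution v → Spec_solution v (solution v)

-- ===== LEMMAS AND PROOFS =====

/-- weight-sum of boundary flags over adjacent pairs: the first pair carries weight `|P|`. -/
def pvF : List (Int × Int) → Int
  | [] => 0
  | p :: P => (if p.2 ≠ p.1 then ((P.length : Int) + 1) else 0) + pvF P

/-- rank-weighted count sum, B's loop body in recursive form. -/
def pvS (c : Int → Int) : Int → List Int → Int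
  | _, [] => 0
  | i, d :: K => i * c d + pvS c (i + 1) K

lemma pvS_congr (c c' : Int → Int) : ∀ (K : List Int) (i : Int),
    (∀ d ∈ K, c d = c' d) → pvS c i K = pvS c' i K := by
  intro K
  induction K with
  | nil => intro i _; rfl
  | cons d K ih =>
      intro i h
      simp only [pvS, h d (List.mem_cons_self), ih (i + 1) (fun e he => h e (List.mem_cons_of_mem _ he))]

lemma pvS_shift (c : Int → Int) : ∀ (K : List Int) (i : Int),
    pvS c (i + 1) K = pvS c i K + (K.map c).sum := by
  intro K
  induction K with
  | nil => intro i; simp [pvS]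
  | cons d K ih =>
      intro i
      simp only [pvS, ih, List.map_cons, List.sum_cons]
      ring

lemma pvEnum_fold (c : Int → Int) : ∀ (K : List Int) (i acc : Int),
    (PySem.List.enumerate K i).foldl (fun res p => res + p.1 * c p.2) acc = acc + pvS c i K := by
  intro K
  induction K with
  | nil => intro i acc; simp [PySem.List.enumerate_nil, pvS]
  | cons d K ih =>
      intro i acc
      rw [PySem.List.enumerate_cons]
      simp only [List.foldl_cons, ih, pvS]
      ring

lemma pvGetD_cons_shift (x : Int) (t : List Int) (i : Int) (h : 1 ≤ i) :
    PySem.List.pyGetD (x :: t) i 0 = PySem.List.pyGetD t (i - 1) 0 := by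
  simp only [PySem.List.pyGetD]
  rw [PySem.List.pyGet?_of_nonneg _ (by omega : (0:Int) ≤ i),
      PySem.List.pyGet?_of_nonneg _ (by omega : (0:Int) ≤ i - 1)]
  have hk : i.toNat = (i - 1).toNat + 1 := by omega
  rw [hk, List.getElem?_cons_succ]

/-- A's fold over the reversed-index range equals the weight-sum of adjacent pairs. -/
lemma pvA_eq_pvF (s : List Int) :
    (PySem.List.pyRange 1 (s.length : Int) 1).foldl
      (fun res i =>
        if PySem.List.pyGetD s ((s.length : Int) - i - 1) 0 ≠
            PySem.List.pyGetD s ((s.length : Int) - i) 0 then res + i else res)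
      0 = pvF (s.zip (s.drop 1)) := by
  induction s with
  | nil => simp [PySem.List.pyRange_one_eq_nil, pvF]
  | cons x t ih =>
      cases t with
      | nil =>
          simp [PySem.List.pyRange_one_eq_nil, pvF]
      | cons y u =>
          set t := y :: u with ht
          have h1 : (1:Int) ≤ (t.length : Int) := by simp [ht]
          have hL : ((x :: t).length : Int) = (t.length : Int) + 1 := by simp
          have hsplit : PySem.List.pyRange 1 ((x :: t).length : Int) 1
              = PySem.List.pyRange 1 (t.length : Int) 1 ++ [(t.length : Int)] := by
            rw [hL, PySem.List.pyRange_one_succ_right h1]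
          rw [hsplit, List.foldl_append]
          have hcongr : ∀ (init : Int), (PySem.List.pyRange 1 (t.length : Int) 1).foldl
              (fun res i =>
                if PySem.List.pyGetD (x :: t) (((x :: t).length : Int) - i - 1) 0 ≠
                    PySem.List.pyGetD (x :: t) (((x :: t).length : Int) - i) 0 then res + i else res)
              init
            = (PySem.List.pyRange 1 (t.length : Int) 1).foldl
              (fun res i =>
                if PySem.List.pyGetD t ((t.length : Int) - i - 1) 0 ≠
                    PySem.List.pyGetD t ((t.length : Int) - i) 0 then res + i else res)
              init := by
            intro init
            apply PySem.List.foldl_congr_mem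
            intro acc i hi
            rw [PySem.List.mem_pyRange_one] at hi
            rw [hL,
                pvGetD_cons_shift x t ((t.length : Int) + 1 - i - 1) (by omega),
                pvGetD_cons_shift x t ((t.length : Int) + 1 - i) (by omega)]
            simp only [show (t.length : Int) + 1 - i - 1 = (t.length : Int) - i from by ring]
          rw [hcongr, ih]
          -- last iteration: i = t.length, comparing s[0] and s[1]
          simp only [List.foldl_cons, List.foldl_nil, hL]
          rw [pvGetD_cons_shift x t ((t.length : Int) + 1 - (t.length : Int)) (by omega)]
          simp only [show (t.length : Int) + 1 - (t.length : Int) - 1 = 0 from by ring]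
          have g0 : PySem.List.pyGetD (x :: t) (0:Int) 0 = x := PySem.List.pyGetD_zero_cons _ _ _
          have g1 : PySem.List.pyGetD t (0:Int) 0 = y := by
            rw [ht]; exact PySem.List.pyGetD_zero_cons _ _ _
          rw [g0, g1]
          have hzip : (x :: t).zip ((x :: t).drop 1) = (x, y) :: t.zip (t.drop 1) := by
            simp [ht]
          rw [hzip]
          have hlenzip : ((t.zip (t.drop 1)).length : Int) + 1 = (t.length : Int) := by
            simp [ht]
          by_cases hxy : x = y
          · simp [pvF, hxy]
          · have : ¬ (y = x) := fun hyx => hxy hyx.symm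
            simp only [pvF, ne_eq, hxy, this, not_false_eq_true, if_true, hlenzip]
            ring

/-- sum of counts over a duplicate-free enumeration of t's values is t's length. -/
lemma pvSum_counts (t K : List Int) (hnd : K.Nodup) (hmem : ∀ d, d ∈ K ↔ d ∈ t) :
    (K.map (fun d => (t.count d : Int))).sum = (t.length : Int) := by
  have hperm : K.Perm t.dedup := by
    rw [List.perm_ext_iff_of_nodup hnd t.nodup_dedup]
    intro a; rw [hmem, List.mem_dedup]
  have : (K.map (fun d => t.count d)).sum = t.length := by
    rw [(hperm.map (fun d => t.count d)).sum_eq]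
    exact t.sum_map_count_dedup_eq_length
  have h2 : K.map (fun d => ((t.count d : Nat) : Int))
      = (K.map (fun d => t.count d)).map (Nat.cast) := by rw [List.map_map]; rfl
  rw [h2, ← Nat.cast_list_sum, this]

/-- core: for sorted s and its strictly increasing distinct list K, B's sum is A's weight-sum. -/
lemma pv_main : ∀ (s K : List Int), s.Pairwise (· ≤ ·) → K.Pairwise (· < ·) →
    (∀ d, d ∈ K ↔ d ∈ s) →
    pvS (fun d => (s.count d : Int)) 0 K = pvF (s.zip (s.drop 1)) := by
  intro s
  induction s with
  | nil =>
      intro K _ _ hmem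
      have : K = [] := List.eq_nil_iff_forall_not_mem.mpr (fun a ha => by
        simpa using (hmem a).mp ha)
      subst this; rfl
  | cons x t ih =>
      intro K hs hK hmem
      have hxK : x ∈ K := (hmem x).mpr List.mem_cons_self
      have hlb : ∀ y ∈ K, x ≤ y := by
        intro y hy
        rcases List.mem_cons.mp ((hmem y).mp hy) with h | h
        · simp [h]
        · exact (List.pairwise_cons.mp hs).1 y h
      obtain ⟨K', rfl⟩ : ∃ K', K = x :: K' := by
        cases K with
        | nil => cases hxK
        | cons k K' =>
            rcases List.mem_cons.mp hxK with h | h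
            · exact ⟨K', by rw [h]⟩
            · exfalso
              have hkx : k < x := (List.pairwise_cons.mp hK).1 x h
              exact absurd (hlb k List.mem_cons_self) (by omega)
      have hK' : K'.Pairwise (· < ·) := (List.pairwise_cons.mp hK).2
      have hxltK' : ∀ d ∈ K', x < d := (List.pairwise_cons.mp hK).1
      have ht : t.Pairwise (· ≤ ·) := (List.pairwise_cons.mp hs).2
      have hcnt : ∀ d ∈ K', ((x :: t).count d : Int) = (t.count d : Int) := by
        intro d hd
        have hdx : d ≠ x := fun h => by
          have := hxltK' d hd; omega
        simp [Ne.symm hdx]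
      simp only [pvS, zero_mul, zero_add]
      by_cases hx : x ∈ t
      · -- x repeats: head of t is x, the first adjacent pair contributes nothing
        have hmem' : ∀ d, d ∈ x :: K' ↔ d ∈ t := by
          intro d
          rw [hmem d]
          constructor
          · intro hd
            rcases List.mem_cons.mp hd with h | h
            · rw [h]; exact hx
            · exact h
          · intro hd
            exact List.mem_cons_of_mem _ hd
        have hih := ih (x :: K') ht hK hmem'
        simp only [pvS, zero_mul, zero_add] at hih
        have hc : pvS (fun d => ((x :: t).count d : Int)) 1 K'
            = pvS (fun d => (t.count d : Int)) 1 K' := pvS_congr _ _ K' 1 hcnt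
        rw [hc, hih]
        -- pvF side: t = x :: u with first flag false
        cases t with
        | nil => cases hx
        | cons y u =>
            have hyx : y = x := by
              have hxy : x ≤ y := (List.pairwise_cons.mp hs).1 y List.mem_cons_self
              rcases List.mem_cons.mp hx with h | h
              · omega
              · have := (List.pairwise_cons.mp ht).1 x h; omega
            simp [pvF, hyx]
      · -- x fresh: every later element gains one distinct value below it
        have hmem' : ∀ d, d ∈ K' ↔ d ∈ t := by
          intro d
          constructor
          · intro hd
            rcases List.mem_cons.mp ((hmem d).mp (List.mem_cons_of_mem _ hd)) with h | h
            · exact absurd (hxltK' d hd) (by omega)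
            · exact h
          · intro hd
            rcases List.mem_cons.mp ((hmem d).mpr (List.mem_cons_of_mem _ hd)) with h | h
            · exact absurd (h ▸ hd) hx
            · exact h
        have hih := ih K' ht hK' hmem'
        have hnd : K'.Nodup := hK'.imp (fun h => by omega)
        have hsum := pvSum_counts t K' hnd hmem'
        have hc : pvS (fun d => ((x :: t).count d : Int)) 0 K'
            = pvS (fun d => (t.count d : Int)) 0 K' := pvS_congr _ _ K' 0 hcnt
        have hmapc : K'.map (fun d => ((x :: t).count d : Int))
            = K'.map (fun d => (t.count d : Int)) := List.map_congr_left hcnt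
        have h01 : (0 : Int) + 1 = 1 := by norm_num
        rw [← h01, pvS_shift, hc, hih, hmapc, hsum]
        -- pvF side: first flag is true (t's head differs from x)
        cases t with
        | nil => simp [pvF]
        | cons y u =>
            have hyx : ¬ (y = x) := fun h => hx (h ▸ List.mem_cons_self)
            have hlz : ((y :: u).zip u).length = u.length := by
              simp [List.length_zip]
            simp only [List.drop_succ_cons, List.drop_zero, List.zip_cons_cons, pvF, ne_eq, hyx,
              not_false_eq_true, if_true, hlz, List.length_cons]
            push_cast
            ring
  
lemma pvF_short (s : List Int) (h : s.length ≤ 1) : pvF (s.zip (s.drop 1)) = 0 := by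
  match s, h with
  | [], _ => rfl
  | [a], _ => rfl

lemma pv_eq (v : List Int) : solution v = solution_alt v := by
  have hcounter : v.foldl (fun d x => PySem.Dict.insert d x (PySem.Dict.getD d x 0 + 1)) PySem.Dict.empty
      = PySem.Dict.counter v := PySem.Dict.foldl_insert_getD_add_one_eq_counter v
  set s := PySem.List.sorted v (fun x => x) false with hsdef
  set K := PySem.List.sorted (PySem.Dict.keys (PySem.Dict.counter v)) (fun x => x) false with hKdef
  have hperm : s.Perm v := PySem.List.sorted_perm v _ _
  have hKeq : K = PySem.List.sorted (PySem.Set.ofList v) (fun x => x) false := by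
    rw [hKdef, PySem.Dict.keys_counter]
  have hKlt : K.Pairwise (· < ·) := by
    rw [hKeq]; exact PySem.List.sorted_ofList_pairwise_lt v
  have hKmem : ∀ d, d ∈ K ↔ d ∈ s := by
    intro d
    rw [hKeq, PySem.List.mem_sorted, PySem.Set.mem_ofList, hperm.mem_iff]
  have hsle : s.Pairwise (· ≤ ·) := PySem.List.sorted_pairwise v (fun x => x)
  have hlen : s.length = v.length := PySem.List.length_sorted v _ _
  have hB : solution_alt v = pvF (s.zip (s.drop 1)) :=
    calc solution_alt v
        = (PySem.List.enumerate K).foldl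
            (fun res p => res + p.1 * PySem.Dict.getD (PySem.Dict.counter v) p.2 0) 0 := by
          show (PySem.List.enumerate (PySem.List.sorted (PySem.Dict.keys
              (v.foldl (fun d x => PySem.Dict.insert d x (PySem.Dict.getD d x 0 + 1))
                PySem.Dict.empty)) (fun x => x) false)).foldl
            (fun res p => res + p.1 * PySem.Dict.getD
              (v.foldl (fun d x => PySem.Dict.insert d x (PySem.Dict.getD d x 0 + 1))
                PySem.Dict.empty) p.2 0) 0 = _
          rw [hcounter]
      _ = (PySem.List.enumerate K).foldl (fun res p => res + p.1 * (s.count p.2 : Int)) 0 := by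
          apply PySem.List.foldl_congr_mem
          intro acc p _
          rw [PySem.Dict.getD_counter, ← hperm.count_eq]
      _ = 0 + pvS (fun d => (s.count d : Int)) 0 K :=
          pvEnum_fold (fun d => (s.count d : Int)) K 0 0
      _ = pvF (s.zip (s.drop 1)) := by
          rw [zero_add]; exact pv_main s K hsle hKlt hKmem
  rw [hB]
  show (if (v.length : Int) < 2 then (0:Int) else _) = _
  by_cases h : ((v.length : Int) < 2)
  · rw [if_pos h, pvF_short s (by omega)]
  · rw [if_neg h]
    have hl : (v.length : Int) = (s.length : Int) := by rw [hlen]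
    calc (PySem.List.pyRange 1 (v.length : Int) 1).foldl
          (fun res i =>
            if PySem.List.pyGetD s ((v.length : Int) - i - 1) 0 ≠
                PySem.List.pyGetD s ((v.length : Int) - i) 0 then res + i else res) 0
        = (PySem.List.pyRange 1 (s.length : Int) 1).foldl
          (fun res i =>
            if PySem.List.pyGetD s ((s.length : Int) - i - 1) 0 ≠
                PySem.List.pyGetD s ((s.length : Int) - i) 0 then res + i else res) 0 := by
          rw [hl]
      _ = pvF (s.zip (s.drop 1)) := pvA_eq_pvF s

-- ===== VERDICT (by name: the statement is the Claim_ definition above) =====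
theorem solution_spec : Claim_equal_solution := by
  intro v _
  unfold Spec_solution
  exact pv_eq v
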